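-- pv_equiv track=rewrite | github.com/Gyuchool/Algorithm | 프로그래머스/코딩테스트/숫자 게임.py | solution
-- ===== SOURCE A (Python) =====
-- import bisect
--
-- def solution(A, B):
--     answer = 0
--     A = sorted(A)
--     b = sorted(B)
--     for a in A:
--         right = bisect.bisect_right(b, a)
--         if right == len(b):
--             continue
--         else:
--             b.remove(b[right])
--             answer += 1
--             continue
--     return answer
-- ===== SOURCE B (Python) =====
-- def solution(A, B):
--     sa = sorted(A)
--     sb = sorted(B)
--     count = 0
--     j = 0
--     for a in sa:
--         while j < len(sb) and sb[j] <= a: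
--             j += 1
--         if j == len(sb):
--             break
--         count += 1
--         j += 1
--     return count
-- ===== Notes on version B (the rewrite author's own statement) =====
-- stated objective: faster
-- what changed: Replaces per-element binary search plus O(n) list removal over a mutating list with a single two-pointer sweep over the two sorted lists (no removals).
import Mathlib
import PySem

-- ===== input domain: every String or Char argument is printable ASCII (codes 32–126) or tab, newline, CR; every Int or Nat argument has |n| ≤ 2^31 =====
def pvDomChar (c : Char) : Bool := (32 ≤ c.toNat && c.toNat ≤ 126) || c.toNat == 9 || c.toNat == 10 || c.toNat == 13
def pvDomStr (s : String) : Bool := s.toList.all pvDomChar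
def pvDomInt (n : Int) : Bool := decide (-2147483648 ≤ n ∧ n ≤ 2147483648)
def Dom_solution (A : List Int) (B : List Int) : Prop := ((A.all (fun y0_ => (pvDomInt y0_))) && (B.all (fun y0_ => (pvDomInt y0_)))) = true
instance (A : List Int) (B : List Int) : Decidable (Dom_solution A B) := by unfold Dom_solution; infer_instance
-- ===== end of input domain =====

-- B replaces A's per-element bisect + O(n) list removal with a single two-pointer
-- sweep over the two sorted lists (faster; the return value is unchanged).

-- ===== PORT A =====
-- for a in sorted(A): right = bisect_right(b, a); skip if right == len(b), else remove b[right], answer += 1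
def solutionGo : List Int → List Int → Int → Int
  | [], _b, answer => answer
  | a :: rest, b, answer =>
    let right := PySem.List.bisectRight b a
    if right = b.length then solutionGo rest b answer
    else
      let v := (PySem.List.pyGet? b (right : Int)).getD 0
      solutionGo rest ((PySem.List.remove? b v).getD b) (answer + 1)

def solution (A : List Int) (B : List Int) : Int :=
  solutionGo (PySem.List.sorted A (fun x => x)) (PySem.List.sorted B (fun x => x)) 0

-- ===== PORT B =====
-- two-pointer: advance j past sb-elements ≤ a (here: drop the ≤ a prefix of the suffix), break when exhausted
def solutionAltGo : List Int → List Int → Int → Int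
  | [], _s, count => count
  | a :: rest, s, count =>
    match s.dropWhile (fun x => decide (x ≤ a)) with
    | [] => count
    | _ :: tl => solutionAltGo rest tl (count + 1)

def solution_alt (A : List Int) (B : List Int) : Int :=
  solutionAltGo (PySem.List.sorted A (fun x => x)) (PySem.List.sorted B (fun x => x)) 0

-- ===== PRECONDITION & SPEC =====
def Spec_solution (A : List Int) (B : List Int) (out : Int) : Prop := out = solution_alt A B
instance (A : List Int) (B : List Int) (out : Int) : Decidable (Spec_solution A B out) := by unfold Spec_solution; infer_instance

-- ===== CLAIM (what is proved, stated in full; the proofs are below) =====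
def Claim_equal_solution : Prop := ∀ (A : List Int) (B : List Int), Dom_solution A B → Spec_solution A B (solution A B)

-- ===== LEMMAS AND PROOFS =====

-- remove the first occurrence of v when everything before it differs from v
theorem remove?_append_cons (p t : List Int) (v : Int) (hp : ∀ x ∈ p, x ≠ v) :
    PySem.List.remove? (p ++ v :: t) v = some (p ++ t) := by
  induction p with
  | nil => simp
  | cons x xs ih =>
      have hx : x ≠ v := hp x (by simp)
      rw [List.cons_append, PySem.List.remove?_cons_of_ne _ hx,
        ih (fun y hy => hp y (by simp [hy]))]
      rfl

-- if every element of b is ≤ every remaining a, A's loop never matches again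
theorem solutionGo_stuck (as b : List Int) (ans : Int)
    (hb : b.Pairwise (· ≤ ·))
    (h : ∀ x ∈ b, ∀ a ∈ as, x ≤ a) :
    solutionGo as b ans = ans := by
  induction as with
  | nil => rfl
  | cons a rest ih =>
      have hspec := PySem.List.bisectRight_spec b a hb
      have hr : PySem.List.bisectRight b a = b.length := by
        by_contra hne
        have hlt : PySem.List.bisectRight b a < b.length :=
          lt_of_le_of_ne hspec.1 hne
        have := hspec.2.2 _ hlt le_rfl
        have hle := h _ (List.getElem_mem hlt) a (by simp)
        omega
      simp only [solutionGo, hr]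
      exact ih (fun x hx a' ha' => h x hx a' (by simp [ha']))

-- main invariant: A's b is pre ++ s with pre all ≤ every remaining a; B works on s
theorem go_eq (as : List Int) : ∀ (pre s : List Int) (ans : Int),
    (pre ++ s).Pairwise (· ≤ ·) →
    as.Pairwise (· ≤ ·) →
    (∀ x ∈ pre, ∀ a ∈ as, x ≤ a) →
    solutionGo as (pre ++ s) ans = solutionAltGo as s ans := by
  induction as with
  | nil => intro pre s ans _ _ _; rfl
  | cons a rest ih =>
      intro pre s ans hb has hpre
      have hskip : ∀ x ∈ s.takeWhile (fun x => decide (x ≤ a)), x ≤ a := by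
        intro x hx
        simpa using List.mem_takeWhile_imp hx
      have hsplit : s = s.takeWhile (fun x => decide (x ≤ a)) ++
          s.dropWhile (fun x => decide (x ≤ a)) :=
        (List.takeWhile_append_dropWhile).symm
      have ha_rest : ∀ a' ∈ rest, a ≤ a' := (List.pairwise_cons.mp has).1
      have hspec := PySem.List.bisectRight_spec (pre ++ s) a hb
      cases hd : s.dropWhile (fun x => decide (x ≤ a)) with
      | nil =>
          -- all of b ≤ a ≤ every remaining element of A: both loops finish at ans
          have hball : ∀ x ∈ pre ++ s, x ≤ a := by
            intro x hx
            rcases List.mem_append.mp hx with h1 | h2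
            · exact hpre x h1 a (by simp)
            · rw [hsplit, hd, List.append_nil] at h2
              exact hskip x h2
          have hr : PySem.List.bisectRight (pre ++ s) a = (pre ++ s).length := by
            by_contra hne
            have hlt := lt_of_le_of_ne hspec.1 hne
            have := hspec.2.2 _ hlt le_rfl
            have := hball _ (List.getElem_mem hlt)
            omega
          simp only [solutionGo, hr, solutionAltGo, hd]
          exact solutionGo_stuck rest (pre ++ s) ans hb
            (fun x hx a' ha' => le_trans (hball x hx) (ha_rest a' ha'))
      | cons v tl =>
          have hv : a < v := by
            have : ¬ (decide (v ≤ a) = true) := by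
              have := List.head_dropWhile_not (fun x => decide (x ≤ a))
                (l := s) (by rw [hd]; simp)
              simpa [hd] using this
            simpa using this
          -- b = (pre ++ skip) ++ v :: tl
          set skip := s.takeWhile (fun x => decide (x ≤ a)) with hskipdef
          have hbeq : pre ++ s = (pre ++ skip) ++ v :: tl := by
            rw [hsplit, hd]; simp
          have hpresk : ∀ x ∈ pre ++ skip, x ≤ a := by
            intro x hx
            rcases List.mem_append.mp hx with h1 | h2
            · exact hpre x h1 a (by simp)
            · exact hskip x h2
          -- bisect lands exactly at |pre ++ skip|
          have hlen : (pre ++ skip).length < (pre ++ s).length := by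
            rw [hbeq]; simp
          have hr : PySem.List.bisectRight (pre ++ s) a = (pre ++ skip).length := by
            rcases lt_trichotomy (PySem.List.bisectRight (pre ++ s) a)
              (pre ++ skip).length with hlt | heq | hgt
            · exfalso
              have hj : PySem.List.bisectRight (pre ++ s) a < (pre ++ s).length :=
                lt_trans hlt hlen
              have h1 := hspec.2.2 _ hj le_rfl
              have hmem : (pre ++ s)[PySem.List.bisectRight (pre ++ s) a] ∈ pre ++ skip := by
                rw [List.getElem_of_eq hbeq hj, List.getElem_append_left hlt]
                exact List.getElem_mem hlt
              have := hpresk _ hmem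
              omega
            · exact heq
            · exfalso
              have h1 := hspec.2.1 _ hlen hgt
              have : (pre ++ s)[(pre ++ skip).length] = v := by
                rw [List.getElem_of_eq hbeq hlen]
                simp
              omega
          have hvget : (PySem.List.pyGet? (pre ++ s) ((pre ++ skip).length : Int)).getD 0 = v := by
            rw [hbeq, PySem.List.pyGet?_append_length]; rfl
          have hrem : (PySem.List.remove? (pre ++ s) v).getD (pre ++ s) =
              (pre ++ skip) ++ tl := by
            rw [hbeq, remove?_append_cons _ _ _
              (fun x hx => ne_of_lt (lt_of_le_of_lt (hpresk x hx) hv))]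
            rfl
          simp only [solutionGo, hr, if_neg (by omega : ¬ (pre ++ skip).length = (pre ++ s).length),
            hvget, hrem, solutionAltGo, hd]
          have hb' : ((pre ++ skip) ++ tl).Pairwise (· ≤ ·) := by
            refine List.Pairwise.sublist ?_ (hbeq ▸ hb)
            exact List.Sublist.append (List.Sublist.refl _) (List.sublist_cons_self _ _)
          exact ih (pre ++ skip) tl (ans + 1) hb' (List.pairwise_cons.mp has).2
            (fun x hx a' ha' => le_trans (hpresk x hx) (ha_rest a' ha'))

-- ===== VERDICT (by name: the statement is the Claim_ definition above) =====
theorem solution_spec : Claim_equal_solution := by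
  intro A B _
  unfold Spec_solution solution solution_alt
  have := go_eq (PySem.List.sorted A (fun x => x)) []
    (PySem.List.sorted B (fun x => x)) 0
    (by simpa using PySem.List.sorted_pairwise B (fun x => x))
    (PySem.List.sorted_pairwise A (fun x => x))
    (by simp)
  simpa using this
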